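-- pv_equiv track=rewrite | github.com/ShawnYi5/Box_Dashboard | xdashboard/handle/sysSetting/ether.py | _get_valid_ether_name
-- ===== SOURCE A (Python) =====
-- def _get_valid_ether_name(ethers_info):
--     valid_ether_name = list()
--     _list = list()
--     one_ether_lines = list()
--     for line in ethers_info:
--         if line == '':
--             _list.append(one_ether_lines)
--             one_ether_lines = list()
--         else:
--             one_ether_lines.append(line)
--
--     for ether in _list:
--         ether_str = ''.join(ether)
--         if ether_str.startswith('lo') or ether_str.startswith('tap') or ether_str.startswith('vbr'):
--             continue
--         if 'inet ' not in ether_str: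
--             continue
--         valid_ether_name.append(ether[0].split(': flags')[0])
--
--     return valid_ether_name
-- ===== SOURCE B (Python) =====
-- def _get_valid_ether_name(ethers_info):
--     valid_ether_name = []
--     one_ether_lines = []
--     for line in ethers_info:
--         if line != '':
--             one_ether_lines.append(line)
--             continue
--         # blank line closes the current group: evaluate it inline
--         ether_str = ''.join(one_ether_lines)
--         if (not (ether_str.startswith('lo') or ether_str.startswith('tap')
--                  or ether_str.startswith('vbr'))) and 'inet ' in ether_str:
--             valid_ether_name.append(one_ether_lines[0].split(': flags')[0])
--         one_ether_lines = []
--     # a trailing group never closed by a blank line is dropped, as in the original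
--     return valid_ether_name
-- ===== Notes on version B (the rewrite author's own statement) =====
-- stated objective: simpler
-- what changed: Replaces A's two sequential passes with an intermediate list of line-groups by a single streaming pass that keeps only the current group and finalizes it inline at each blank line (a trailing unterminated group is still dropped, as in A).
import Mathlib
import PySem

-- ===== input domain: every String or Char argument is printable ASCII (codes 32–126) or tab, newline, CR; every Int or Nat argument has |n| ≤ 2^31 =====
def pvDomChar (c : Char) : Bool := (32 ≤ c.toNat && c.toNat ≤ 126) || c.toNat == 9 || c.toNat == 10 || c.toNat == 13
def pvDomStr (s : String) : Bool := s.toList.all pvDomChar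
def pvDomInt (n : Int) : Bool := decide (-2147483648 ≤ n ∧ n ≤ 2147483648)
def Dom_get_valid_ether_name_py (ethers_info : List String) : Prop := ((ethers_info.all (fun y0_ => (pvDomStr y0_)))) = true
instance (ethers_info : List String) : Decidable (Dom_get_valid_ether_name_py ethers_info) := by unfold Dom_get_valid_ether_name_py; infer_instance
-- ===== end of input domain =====

-- B replaces A's two passes (group, then filter/map the list of groups) by one streaming pass
-- that finalizes each group inline; objective: simpler (one loop, no intermediate list of groups).

-- ===== PORT A =====
-- ether[0].split(': flags')[0]; the `.getD ""` arms are unreachable in both Pythons (the index is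
-- guarded by `'inet ' in ether_str`, which fails on the empty group, and split with a nonempty
-- separator never returns []).
def pvGroupName (ether : List String) : String :=
  (PySem.List.pyGet? ((PySem.Str.split? ((PySem.List.pyGet? ether 0).getD "") ": flags").getD []) 0).getD ""

-- the body of A's second loop for one group `ether`
def pvStepA (valid : List String) (ether : List String) : List String :=
  let ether_str := PySem.Str.join "" ether
  if PySem.Str.startswith ether_str "lo" || PySem.Str.startswith ether_str "tap"
      || PySem.Str.startswith ether_str "vbr" then valid
  else if !PySem.Str.isIn "inet " ether_str then valid
  else valid ++ [pvGroupName ether]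

def get_valid_ether_name_py (ethers_info : List String) : List String :=
  -- first loop: split into groups at empty lines (state = (_list, one_ether_lines))
  let st := ethers_info.foldl
    (fun (st : List (List String) × List String) line =>
      if line == "" then (st.1 ++ [st.2], []) else (st.1, st.2 ++ [line]))
    ([], [])
  -- second loop over the collected groups
  st.1.foldl pvStepA []

-- ===== PORT B =====
-- the body of B's single loop (state = (valid_ether_name, one_ether_lines))
def pvStepB (st : List String × List String) (line : String) : List String × List String :=
  if line != "" then (st.1, st.2 ++ [line])
  else
    let ether_str := PySem.Str.join "" st.2
    if (!(PySem.Str.startswith ether_str "lo" || PySem.Str.startswith ether_str "tap"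
            || PySem.Str.startswith ether_str "vbr")) && PySem.Str.isIn "inet " ether_str then
      (st.1 ++ [pvGroupName st.2], [])
    else (st.1, [])

def get_valid_ether_name_py_alt (ethers_info : List String) : List String :=
  (ethers_info.foldl pvStepB ([], [])).1

-- ===== PRECONDITION & SPEC =====
def Spec_get_valid_ether_name_py (ethers_info : List String) (out : List String) : Prop := out = get_valid_ether_name_py_alt ethers_info
instance (ethers_info : List String) (out : List String) : Decidable (Spec_get_valid_ether_name_py ethers_info out) := by unfold Spec_get_valid_ether_name_py; infer_instance

-- ===== CLAIM (what is proved, stated in full; the proofs are below) =====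
def Claim_equal_get_valid_ether_name_py : Prop := ∀ (ethers_info : List String), Dom_get_valid_ether_name_py ethers_info → Spec_get_valid_ether_name_py ethers_info (get_valid_ether_name_py ethers_info)

-- ===== LEMMAS AND PROOFS =====

-- finalizing one group: A's loop body and B's inline test agree
theorem pvStep_eq (valid ether : List String) :
    pvStepA valid ether = (pvStepB (valid, ether) "").1 := by
  unfold pvStepA pvStepB
  simp
  split_ifs <;> simp_all

-- B's step on an empty line closes the group exactly as A's second-loop body does
theorem pvStepB_empty (v cur : List String) :
    pvStepB (v, cur) "" = (pvStepA v cur, []) := by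
  rw [pvStep_eq]
  refine Prod.ext rfl ?_
  unfold pvStepB
  simp
  split_ifs <;> rfl

-- B's step on a non-empty line just extends the current group
theorem pvStepB_line (v cur : List String) (line : String) (h : ¬ line = "") :
    pvStepB (v, cur) line = (v, cur ++ [line]) := by
  unfold pvStepB
  simp [h]

-- the main invariant: running A's second loop over the groups collected so far,
-- then over the groups the remaining lines will close, equals B's single fold
theorem pv_invariant (lines : List String) (L : List (List String)) (cur valid : List String) :
    ((lines.foldl
        (fun (st : List (List String) × List String) line =>
          if line == "" then (st.1 ++ [st.2], []) else (st.1, st.2 ++ [line]))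
        (L, cur)).1).foldl pvStepA valid
      = (lines.foldl pvStepB (L.foldl pvStepA valid, cur)).1 := by
  induction lines generalizing L cur valid with
  | nil => simp
  | cons line rest ih =>
    simp only [List.foldl_cons]
    by_cases h : line = ""
    · subst h
      have hf : (if (("" : String) == "") = true then (L ++ [cur], ([] : List String))
          else (L, cur ++ [""])) = (L ++ [cur], []) := by simp
      rw [hf, ih, pvStepB_empty, List.foldl_append, List.foldl_cons, List.foldl_nil]
    · have hf : (if (line == "") = true then (L ++ [cur], ([] : List String))
          else (L, cur ++ [line])) = (L, cur ++ [line]) := by simp [h]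
      rw [hf, ih, pvStepB_line _ _ _ h]

-- ===== VERDICT (by name: the statement is the Claim_ definition above) =====
theorem get_valid_ether_name_py_spec : Claim_equal_get_valid_ether_name_py := by
  intro ethers_info _
  unfold Spec_get_valid_ether_name_py get_valid_ether_name_py get_valid_ether_name_py_alt
  simpa using pv_invariant ethers_info [] [] []
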